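-- pv_equiv track=rewrite | github.com/pragyasharva-dev/id-card-yemen | services/translation_service.py | _double_metaphone_simple
-- ===== SOURCE A (Python) =====
-- def _double_metaphone_simple(text: str) -> str:
--     """
--     Simple Double Metaphone implementation for phonetic encoding.
--     Returns primary encoding only.
--
--     This is a simplified version focused on common name patterns.
--     """
--     text = text.upper()
--     result = []
--     i = 0
--
--     while i < len(text):
--         c = text[i]
--
--         # Skip non-letters
--         if not c.isalpha():
--             i += 1
--             continue
--
--         # Vowels at start
--         if c in 'AEIOU':
--             if i == 0:
--                 result.append('A')
--             i += 1
--             continue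
--
--         # Consonant mappings
--         if c == 'B':
--             result.append('P')
--         elif c == 'C':
--             if i + 1 < len(text) and text[i + 1] in 'EIY':
--                 result.append('S')
--             else:
--                 result.append('K')
--         elif c == 'D':
--             result.append('T')
--         elif c == 'F':
--             result.append('F')
--         elif c == 'G':
--             if i + 1 < len(text) and text[i + 1] in 'EIY':
--                 result.append('J')
--             else:
--                 result.append('K')
--         elif c == 'H':
--             result.append('H')
--         elif c == 'J':
--             result.append('J')
--         elif c == 'K':
--             result.append('K')
--         elif c == 'L':
--             result.append('L')
--         elif c == 'M':
--             result.append('M')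
--         elif c == 'N':
--             result.append('N')
--         elif c == 'P':
--             result.append('P')
--         elif c == 'Q':
--             result.append('K')
--         elif c == 'R':
--             result.append('R')
--         elif c == 'S':
--             if i + 1 < len(text) and text[i + 1] == 'H':
--                 result.append('X')
--                 i += 1
--             else:
--                 result.append('S')
--         elif c == 'T':
--             if i + 1 < len(text) and text[i + 1] == 'H':
--                 result.append('0')  # TH sound
--                 i += 1
--             else:
--                 result.append('T')
--         elif c == 'V':
--             result.append('F')
--         elif c == 'W':
--             result.append('W')
--         elif c == 'X':
--             result.append('KS')
--         elif c == 'Y':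
--             result.append('Y')
--         elif c == 'Z':
--             result.append('S')
--
--         i += 1
--
--     return ''.join(result)
-- ===== SOURCE B (Python) =====
-- _DMS_TABLE = {'B': 'P', 'D': 'T', 'F': 'F', 'J': 'J', 'K': 'K', 'L': 'L',
--               'M': 'M', 'N': 'N', 'P': 'P', 'Q': 'K', 'R': 'R', 'V': 'F',
--               'W': 'W', 'X': 'KS', 'Y': 'Y', 'Z': 'S'}
--
--
-- def _dms_emit(prev: str, c: str, nxt: str) -> str:
--     """Code emitted at one position, from a 3-char window (prev/nxt = '' at the edges)."""
--     if not c.isalpha():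
--         return ''
--     if c in ('A', 'E', 'I', 'O', 'U'):
--         return 'A' if prev == '' else ''
--     if c == 'H':
--         return '' if prev in ('S', 'T') else 'H'
--     if c == 'S':
--         return 'X' if nxt == 'H' else 'S'
--     if c == 'T':
--         return '0' if nxt == 'H' else 'T'
--     if c == 'C':
--         return 'S' if nxt in ('E', 'I', 'Y') else 'K'
--     if c == 'G':
--         return 'J' if nxt in ('E', 'I', 'Y') else 'K'
--     return _DMS_TABLE.get(c, '')
--
--
-- def _double_metaphone_simple(text: str) -> str:
--     # Stateless sliding-window encoding: each position's code depends only on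
--     # its immediate neighbours (an H is silent exactly after S/T; the leading
--     # vowel is the one with no previous character).
--     chars = list(text.upper())
--     return ''.join(_dms_emit(p, c, n)
--                    for p, c, n in zip([''] + chars, chars, chars[1:] + ['']))
-- ===== Notes on version B (the rewrite author's own statement) =====
-- stated objective: alternative
-- what changed: Replaced the consuming indexed while-loop state machine by a stateless sliding-window map: each position emits a code computed only from its (prev, cur, next) 3-char window (H is silent exactly after S/T, the leading vowel is the one with empty prev), built with zip instead of index arithmetic and digraph consumption.
import Mathlib
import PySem

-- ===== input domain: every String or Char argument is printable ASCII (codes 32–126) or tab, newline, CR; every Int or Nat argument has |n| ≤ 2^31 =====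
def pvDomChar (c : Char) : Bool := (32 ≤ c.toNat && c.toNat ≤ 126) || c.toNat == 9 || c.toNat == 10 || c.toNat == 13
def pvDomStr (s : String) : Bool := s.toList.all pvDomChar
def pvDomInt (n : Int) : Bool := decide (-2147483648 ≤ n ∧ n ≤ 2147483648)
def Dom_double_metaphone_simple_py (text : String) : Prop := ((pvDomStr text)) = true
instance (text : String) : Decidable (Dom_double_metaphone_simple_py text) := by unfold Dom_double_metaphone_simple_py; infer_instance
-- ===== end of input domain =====

-- B replaces A's consuming indexed while-loop by a stateless sliding-window (prev, cur, next) map; alternative decomposition, same O(n) cost.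


-- ===== PORT A =====
-- the while loop of A: one call = one iteration; S/T followed by H consume two chars (i += 2)
def dmsLoopA : Nat → List Char → List String
  | _, [] => []
  | i, c :: rest =>
    if ¬ PySem.Chars.isalpha c then dmsLoopA (i + 1) rest
    else if c = 'A' ∨ c = 'E' ∨ c = 'I' ∨ c = 'O' ∨ c = 'U' then
      (if i = 0 then "A" :: dmsLoopA (i + 1) rest else dmsLoopA (i + 1) rest)
    else if c = 'B' then "P" :: dmsLoopA (i + 1) rest
    else if c = 'C' then
      (if rest.head? = some 'E' ∨ rest.head? = some 'I' ∨ rest.head? = some 'Y' then "S" else "K") :: dmsLoopA (i + 1) rest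
    else if c = 'D' then "T" :: dmsLoopA (i + 1) rest
    else if c = 'F' then "F" :: dmsLoopA (i + 1) rest
    else if c = 'G' then
      (if rest.head? = some 'E' ∨ rest.head? = some 'I' ∨ rest.head? = some 'Y' then "J" else "K") :: dmsLoopA (i + 1) rest
    else if c = 'H' then "H" :: dmsLoopA (i + 1) rest
    else if c = 'J' then "J" :: dmsLoopA (i + 1) rest
    else if c = 'K' then "K" :: dmsLoopA (i + 1) rest
    else if c = 'L' then "L" :: dmsLoopA (i + 1) rest
    else if c = 'M' then "M" :: dmsLoopA (i + 1) rest
    else if c = 'N' then "N" :: dmsLoopA (i + 1) rest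
    else if c = 'P' then "P" :: dmsLoopA (i + 1) rest
    else if c = 'Q' then "K" :: dmsLoopA (i + 1) rest
    else if c = 'R' then "R" :: dmsLoopA (i + 1) rest
    else if c = 'S' then
      (if rest.head? = some 'H' then "X" :: dmsLoopA (i + 2) rest.tail
       else "S" :: dmsLoopA (i + 1) rest)
    else if c = 'T' then
      (if rest.head? = some 'H' then "0" :: dmsLoopA (i + 2) rest.tail
       else "T" :: dmsLoopA (i + 1) rest)
    else if c = 'V' then "F" :: dmsLoopA (i + 1) rest
    else if c = 'W' then "W" :: dmsLoopA (i + 1) rest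
    else if c = 'X' then "KS" :: dmsLoopA (i + 1) rest
    else if c = 'Y' then "Y" :: dmsLoopA (i + 1) rest
    else if c = 'Z' then "S" :: dmsLoopA (i + 1) rest
    else dmsLoopA (i + 1) rest
  termination_by _ l => l.length
  decreasing_by all_goals (simp [List.length_tail]; try omega)

def double_metaphone_simple_py (text : String) : String :=
  PySem.Str.join "" (dmsLoopA 0 (PySem.Str.upper text).toList)

-- ===== PORT B =====
-- B's single-consonant table (Python dict _DMS_TABLE, .get with default '')
def dmsTable (c : Char) : String :=
  (PySem.Dict.mk [('B', "P"), ('D', "T"), ('F', "F"), ('J', "J"), ('K', "K"), ('L', "L"),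
                  ('M', "M"), ('N', "N"), ('P', "P"), ('Q', "K"), ('R', "R"), ('V', "F"),
                  ('W', "W"), ('X', "KS"), ('Y', "Y"), ('Z', "S")]).getD c ""

-- B's _dms_emit: the code at one position from its 3-char window (Python's '' edge sentinel = none)
def dmsEmit (prev : Option Char) (c : Char) (nxt : Option Char) : String :=
  if ¬ PySem.Chars.isalpha c then ""
  else if c = 'A' ∨ c = 'E' ∨ c = 'I' ∨ c = 'O' ∨ c = 'U' then (if prev = none then "A" else "")
  else if c = 'H' then (if prev = some 'S' ∨ prev = some 'T' then "" else "H")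
  else if c = 'S' then (if nxt = some 'H' then "X" else "S")
  else if c = 'T' then (if nxt = some 'H' then "0" else "T")
  else if c = 'C' then (if nxt = some 'E' ∨ nxt = some 'I' ∨ nxt = some 'Y' then "S" else "K")
  else if c = 'G' then (if nxt = some 'E' ∨ nxt = some 'I' ∨ nxt = some 'Y' then "J" else "K")
  else dmsTable c

def double_metaphone_simple_py_alt (text : String) : String :=
  let chars := (PySem.Str.upper text).toList
  PySem.Str.join ""
    (((none :: chars.map some).zip (chars.zip (chars.tail.map some ++ [none]))).map
      (fun w => dmsEmit w.1 w.2.1 w.2.2))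

-- ===== PRECONDITION & SPEC =====
def Spec_double_metaphone_simple_py (text : String) (out : String) : Prop := out = double_metaphone_simple_py_alt text
instance (text : String) (out : String) : Decidable (Spec_double_metaphone_simple_py text out) := by unfold Spec_double_metaphone_simple_py; infer_instance

-- ===== CLAIM (what is proved, stated in full; the proofs are below) =====
def Claim_equal_double_metaphone_simple_py : Prop := ∀ (text : String), Dom_double_metaphone_simple_py text → Spec_double_metaphone_simple_py text (double_metaphone_simple_py text)

-- ===== LEMMAS AND PROOFS =====

-- recursive form of B's window map, for the induction
def dmsWin : Option Char → List Char → List String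
  | _, [] => []
  | p, c :: rest => dmsEmit p c rest.head? :: dmsWin (some c) rest

lemma chars_join_nil_cons (x : List Char) (L : List (List Char)) :
    PySem.Chars.join [] (x :: L) = x ++ PySem.Chars.join [] L := by
  cases L with
  | nil => simp [PySem.Chars.join_singleton, PySem.Chars.join_nil]
  | cons y R => simp [PySem.Chars.join_cons_cons]

lemma join_empty_cons (a : String) (l : List String) :
    PySem.Str.join "" (a :: l) = a ++ PySem.Str.join "" l := by
  have h : (PySem.Str.join "" (a :: l)).toList = (a ++ PySem.Str.join "" l).toList := by
    simp [PySem.Str.toList_join, chars_join_nil_cons]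
  calc PySem.Str.join "" (a :: l) = String.ofList (PySem.Str.join "" (a :: l)).toList :=
        String.ofList_toList.symm
    _ = String.ofList (a ++ PySem.Str.join "" l).toList := by rw [h]
    _ = a ++ PySem.Str.join "" l := String.ofList_toList

-- B's zip pipeline computes dmsWin
lemma zip_eq_win (l : List Char) (p : Option Char) :
    (((p :: l.map some).zip (l.zip (l.tail.map some ++ [none]))).map
      (fun w => dmsEmit w.1 w.2.1 w.2.2)) = dmsWin p l := by
  induction l generalizing p with
  | nil => simp [dmsWin]
  | cons c rest ih =>
    cases rest with
    | nil => simp [dmsWin]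
    | cons d rest' => simpa [dmsWin] using ih (some c)

-- the string A's loop emits at a non-consuming position (as a function of i, c and the lookahead)
def emitAstr (i : Nat) (c : Char) (nxt : Option Char) : String :=
  if ¬ PySem.Chars.isalpha c then ""
  else if c = 'A' ∨ c = 'E' ∨ c = 'I' ∨ c = 'O' ∨ c = 'U' then (if i = 0 then "A" else "")
  else if c = 'B' then "P"
  else if c = 'C' then (if nxt = some 'E' ∨ nxt = some 'I' ∨ nxt = some 'Y' then "S" else "K")
  else if c = 'D' then "T"
  else if c = 'F' then "F"
  else if c = 'G' then (if nxt = some 'E' ∨ nxt = some 'I' ∨ nxt = some 'Y' then "J" else "K")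
  else if c = 'H' then "H"
  else if c = 'J' then "J"
  else if c = 'K' then "K"
  else if c = 'L' then "L"
  else if c = 'M' then "M"
  else if c = 'N' then "N"
  else if c = 'P' then "P"
  else if c = 'Q' then "K"
  else if c = 'R' then "R"
  else if c = 'S' then "S"
  else if c = 'T' then "T"
  else if c = 'V' then "F"
  else if c = 'W' then "W"
  else if c = 'X' then "KS"
  else if c = 'Y' then "Y"
  else if c = 'Z' then "S"
  else ""

-- one joined step of A's loop
set_option maxHeartbeats 2000000 in
lemma loopA_join_cons (i : Nat) (c : Char) (rest : List Char) :
    PySem.Str.join "" (dmsLoopA i (c :: rest)) =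
      if c = 'S' ∧ rest.head? = some 'H' then
        "X" ++ PySem.Str.join "" (dmsLoopA (i + 2) rest.tail)
      else if c = 'T' ∧ rest.head? = some 'H' then
        "0" ++ PySem.Str.join "" (dmsLoopA (i + 2) rest.tail)
      else emitAstr i c rest.head? ++ PySem.Str.join "" (dmsLoopA (i + 1) rest) := by
  by_cases hS : c = 'S' ∧ rest.head? = some 'H'
  · obtain ⟨rfl, hh⟩ := hS
    rw [if_pos ⟨rfl, hh⟩, dmsLoopA]
    have e : PySem.Chars.isalpha 'S' = true := by decide
    simp [e, hh, join_empty_cons]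
  · rw [if_neg hS]
    by_cases hT : c = 'T' ∧ rest.head? = some 'H'
    · obtain ⟨rfl, hh⟩ := hT
      rw [if_pos ⟨rfl, hh⟩, dmsLoopA]
      have e : PySem.Chars.isalpha 'T' = true := by decide
      simp [e, hh, join_empty_cons]
    · rw [if_neg hT, dmsLoopA]
      unfold emitAstr
      by_cases ha : PySem.Chars.isalpha c
      case neg =>
        simp only [Bool.not_eq_true] at ha
        simp [ha]
      case pos =>
      simp [ha]
      by_cases hv : c = 'A' ∨ c = 'E' ∨ c = 'I' ∨ c = 'O' ∨ c = 'U'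
      · simp [hv]
        split_ifs <;> simp [join_empty_cons]
      · by_cases hB : c = 'B'
        · subst hB; simp [join_empty_cons]
        by_cases hC : c = 'C'
        · subst hC; simp [join_empty_cons]
        by_cases hD : c = 'D'
        · subst hD; simp [join_empty_cons]
        by_cases hF : c = 'F'
        · subst hF; simp [join_empty_cons]
        by_cases hG : c = 'G'
        · subst hG; simp [join_empty_cons]
        by_cases hH : c = 'H'
        · subst hH; simp [join_empty_cons]
        by_cases hJ : c = 'J'
        · subst hJ; simp [join_empty_cons]
        by_cases hK : c = 'K'
        · subst hK; simp [join_empty_cons]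
        by_cases hL : c = 'L'
        · subst hL; simp [join_empty_cons]
        by_cases hM : c = 'M'
        · subst hM; simp [join_empty_cons]
        by_cases hN : c = 'N'
        · subst hN; simp [join_empty_cons]
        by_cases hP : c = 'P'
        · subst hP; simp [join_empty_cons]
        by_cases hQ : c = 'Q'
        · subst hQ; simp [join_empty_cons]
        by_cases hR : c = 'R'
        · subst hR; simp [join_empty_cons]
        by_cases hSc : c = 'S'
        · subst hSc
          have hx : rest.head? ≠ some 'H' := fun h => hS ⟨rfl, h⟩
          simp [hx, join_empty_cons]
        by_cases hTc : c = 'T'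
        · subst hTc
          have hx : rest.head? ≠ some 'H' := fun h => hT ⟨rfl, h⟩
          simp [hx, join_empty_cons]
        by_cases hV : c = 'V'
        · subst hV; simp [join_empty_cons]
        by_cases hW : c = 'W'
        · subst hW; simp [join_empty_cons]
        by_cases hX : c = 'X'
        · subst hX; simp [join_empty_cons]
        by_cases hY : c = 'Y'
        · subst hY; simp [join_empty_cons]
        by_cases hZ : c = 'Z'
        · subst hZ; simp [join_empty_cons]
        simp [eq_false hv, eq_false hB, eq_false hC, eq_false hD, eq_false hF, eq_false hG, eq_false hH, eq_false hJ, eq_false hK, eq_false hL, eq_false hM, eq_false hN, eq_false hP, eq_false hQ, eq_false hR, eq_false hSc, eq_false hTc, eq_false hV, eq_false hW, eq_false hX, eq_false hY, eq_false hZ]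

lemma emit_match (p : Option Char) (i : Nat) (c : Char) (nxt : Option Char)
    (hpi : p = none ↔ i = 0)
    (hinv : ∀ q, p = some q → (q = 'S' ∨ q = 'T') → c ≠ 'H')
    (hS : ¬(c = 'S' ∧ nxt = some 'H')) (hT : ¬(c = 'T' ∧ nxt = some 'H')) :
    dmsEmit p c nxt = emitAstr i c nxt := by
  by_cases ha : PySem.Chars.isalpha c
  case neg =>
    simp only [Bool.not_eq_true] at ha
    unfold dmsEmit emitAstr
    simp [ha]
  case pos =>
  by_cases hv : c = 'A' ∨ c = 'E' ∨ c = 'I' ∨ c = 'O' ∨ c = 'U'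
  · rcases hv with rfl | rfl | rfl | rfl | rfl <;>
      · show (if p = none then "A" else "") = (if i = 0 then "A" else "")
        simp [hpi]
  · by_cases hH : c = 'H'
    · subst hH
      have h1 : p ≠ some 'S' := fun h => hinv 'S' h (Or.inl rfl) rfl
      have h2 : p ≠ some 'T' := fun h => hinv 'T' h (Or.inr rfl) rfl
      show (if p = some 'S' ∨ p = some 'T' then "" else "H") = "H"
      simp [h1, h2]
    by_cases hSc : c = 'S'
    · subst hSc
      have hx : nxt ≠ some 'H' := fun h => hS ⟨rfl, h⟩
      show (if nxt = some 'H' then "X" else "S") = "S"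
      simp [hx]
    by_cases hTc : c = 'T'
    · subst hTc
      have hx : nxt ≠ some 'H' := fun h => hT ⟨rfl, h⟩
      show (if nxt = some 'H' then "0" else "T") = "T"
      simp [hx]
    by_cases hC : c = 'C'
    · subst hC; rfl
    by_cases hG : c = 'G'
    · subst hG; rfl
    by_cases hB : c = 'B'
    · subst hB; rfl
    by_cases hD : c = 'D'
    · subst hD; rfl
    by_cases hF : c = 'F'
    · subst hF; rfl
    by_cases hJ : c = 'J'
    · subst hJ; rfl
    by_cases hK : c = 'K'
    · subst hK; rfl
    by_cases hL : c = 'L'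
    · subst hL; rfl
    by_cases hM : c = 'M'
    · subst hM; rfl
    by_cases hN : c = 'N'
    · subst hN; rfl
    by_cases hP : c = 'P'
    · subst hP; rfl
    by_cases hQ : c = 'Q'
    · subst hQ; rfl
    by_cases hR : c = 'R'
    · subst hR; rfl
    by_cases hV : c = 'V'
    · subst hV; rfl
    by_cases hW : c = 'W'
    · subst hW; rfl
    by_cases hX : c = 'X'
    · subst hX; rfl
    by_cases hY : c = 'Y'
    · subst hY; rfl
    by_cases hZ : c = 'Z'
    · subst hZ; rfl
    unfold dmsEmit emitAstr
    have t1 : (('B' : Char) == c) = false := beq_eq_false_iff_ne.mpr (Ne.symm hB)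
    have t2 : (('D' : Char) == c) = false := beq_eq_false_iff_ne.mpr (Ne.symm hD)
    have t3 : (('F' : Char) == c) = false := beq_eq_false_iff_ne.mpr (Ne.symm hF)
    have t4 : (('J' : Char) == c) = false := beq_eq_false_iff_ne.mpr (Ne.symm hJ)
    have t5 : (('K' : Char) == c) = false := beq_eq_false_iff_ne.mpr (Ne.symm hK)
    have t6 : (('L' : Char) == c) = false := beq_eq_false_iff_ne.mpr (Ne.symm hL)
    have t7 : (('M' : Char) == c) = false := beq_eq_false_iff_ne.mpr (Ne.symm hM)
    have t8 : (('N' : Char) == c) = false := beq_eq_false_iff_ne.mpr (Ne.symm hN)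
    have t9 : (('P' : Char) == c) = false := beq_eq_false_iff_ne.mpr (Ne.symm hP)
    have t10 : (('Q' : Char) == c) = false := beq_eq_false_iff_ne.mpr (Ne.symm hQ)
    have t11 : (('R' : Char) == c) = false := beq_eq_false_iff_ne.mpr (Ne.symm hR)
    have t12 : (('V' : Char) == c) = false := beq_eq_false_iff_ne.mpr (Ne.symm hV)
    have t13 : (('W' : Char) == c) = false := beq_eq_false_iff_ne.mpr (Ne.symm hW)
    have t14 : (('X' : Char) == c) = false := beq_eq_false_iff_ne.mpr (Ne.symm hX)
    have t15 : (('Y' : Char) == c) = false := beq_eq_false_iff_ne.mpr (Ne.symm hY)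
    have t16 : (('Z' : Char) == c) = false := beq_eq_false_iff_ne.mpr (Ne.symm hZ)
    simp [dmsTable, PySem.Dict.getD, PySem.Dict.get?, ha, hv, hH, hSc, hTc, hC, hG,
      hB, hD, hF, hJ, hK, hL, hM, hN, hP, hQ, hR, hV, hW, hX, hY, hZ, t1, t2, t3, t4, t5, t6, t7, t8, t9, t10, t11, t12, t13, t14, t15, t16]

-- the joined outputs of A's loop and B's window map agree, given the loop invariant:
-- the previous character p is none iff i = 0, and an S/T previous character is never
-- followed by H (A would have consumed that H)
lemma dms_main (n : Nat) : ∀ (l : List Char) (p : Option Char) (i : Nat),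
    l.length ≤ n → (p = none ↔ i = 0) →
    (∀ q, p = some q → (q = 'S' ∨ q = 'T') → l.head? ≠ some 'H') →
    PySem.Str.join "" (dmsLoopA i l) = PySem.Str.join "" (dmsWin p l) := by
  induction n with
  | zero =>
    intro l p i hn _ _
    have : l = [] := List.length_eq_zero_iff.mp (Nat.le_zero.mp hn)
    subst this; simp [dmsLoopA, dmsWin]
  | succ n ih =>
    intro l p i hn hpi hinv
    cases l with
    | nil => simp [dmsLoopA, dmsWin]
    | cons c rest =>
      rw [loopA_join_cons]
      have hwin : PySem.Str.join "" (dmsWin p (c :: rest)) =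
          dmsEmit p c rest.head? ++ PySem.Str.join "" (dmsWin (some c) rest) := by
        rw [dmsWin, join_empty_cons]
      split_ifs with hSH hTH
      · -- c = 'S' followed by 'H': A consumes the H, B emits "" at the H position
        obtain ⟨hc, hh⟩ := hSH
        subst hc
        cases rest with
        | nil => simp at hh
        | cons d rest' =>
          simp only [List.head?_cons, Option.some.injEq] at hh
          subst hh
          rw [hwin, dmsWin, join_empty_cons]
          have h1 : dmsEmit p 'S' (('H' :: rest').head?) = "X" := by
            simp [dmsEmit, PySem.Chars.isalpha, PySem.Chars.isupper, PySem.Chars.islower]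
          have h2 : dmsEmit (some 'S') 'H' rest'.head? = "" := by
            simp [dmsEmit, PySem.Chars.isalpha, PySem.Chars.isupper, PySem.Chars.islower]
          rw [h1, h2]
          have := ih rest' (some 'H') (i + 2) (by simp at hn; omega) (by simp)
            (by intro q hq h; simp at hq; subst hq; rcases h with h | h <;> simp at h)
          simp only [List.tail_cons, this]
          simp
      · -- c = 'T' followed by 'H'
        obtain ⟨hc, hh⟩ := hTH
        subst hc
        cases rest with
        | nil => simp at hh
        | cons d rest' =>
          simp only [List.head?_cons, Option.some.injEq] at hh
          subst hh
          rw [hwin, dmsWin, join_empty_cons]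
          have h1 : dmsEmit p 'T' (('H' :: rest').head?) = "0" := by
            simp [dmsEmit, PySem.Chars.isalpha, PySem.Chars.isupper, PySem.Chars.islower]
          have h2 : dmsEmit (some 'T') 'H' rest'.head? = "" := by
            simp [dmsEmit, PySem.Chars.isalpha, PySem.Chars.isupper, PySem.Chars.islower]
          rw [h1, h2]
          have := ih rest' (some 'H') (i + 2) (by simp at hn; omega) (by simp)
            (by intro q hq h; simp at hq; subst hq; rcases h with h | h <;> simp at h)
          simp only [List.tail_cons, this]
          simp
      · -- no digraph consumed: positions line up one for one
        rw [hwin]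
        have hemit : dmsEmit p c rest.head? = emitAstr i c rest.head? :=
          emit_match p i c rest.head? hpi
            (by intro q hq hst; have := hinv q hq hst; simp at this ⊢; intro hc; subst hc; simp_all)
            hSH hTH
        rw [hemit]
        congr 1
        exact ih rest (some c) (i + 1) (by simp at hn; omega) (by simp)
          (by intro q hq hst; simp at hq; subst hq
              rcases hst with h | h <;> subst h
              · intro hcon; exact hSH ⟨rfl, hcon⟩
              · intro hcon; exact hTH ⟨rfl, hcon⟩)

-- ===== VERDICT (by name: the statement is the Claim_ definition above) =====
theorem double_metaphone_simple_py_spec : Claim_equal_double_metaphone_simple_py := by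
  intro text _
  show double_metaphone_simple_py text = double_metaphone_simple_py_alt text
  unfold double_metaphone_simple_py double_metaphone_simple_py_alt
  simp only [zip_eq_win]
  exact dms_main ((PySem.Str.upper text).toList.length) _ none 0 le_rfl (by simp) (by simp)
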